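-- pv_equiv track=rewrite | github.com/ShinhyeongPark/Algorithm | Baekjoon/08145.py | solution
-- ===== SOURCE A (Python) =====
-- import heapq
--
-- def minus(n):
--     return n * (-1)
--
-- def solution(fruitWeights, k):
--     answer = set()
--     for i in range(0, len(fruitWeights)-k+1):
--         tmpList = list(map(minus, fruitWeights[i: i+k]))
--         heapq.heapify(tmpList)
--         tmp = heapq.heappop(tmpList)
--         answer.add(tmp*(-1))
--     answer = list(answer)
--
--     answer.sort(reverse=True)
--     return answer
-- ===== SOURCE B (Python) =====
-- def solution(fruitWeights, k):
--     # Monotonic-deque sliding-window maximum: one pass, amortized O(1) per element.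
--     dq = []       # indices; dq[head:] holds window indices with strictly decreasing values
--     head = 0
--     maxima = set()
--     for j in range(len(fruitWeights)):
--         while len(dq) > head and fruitWeights[dq[-1]] <= fruitWeights[j]:
--             dq.pop()
--         dq.append(j)
--         if dq[head] <= j - k:
--             head += 1
--         if j >= k - 1:
--             maxima.add(fruitWeights[dq[head]])
--     return sorted(maxima, reverse=True)
-- ===== Notes on version B (the rewrite author's own statement) =====
-- stated objective: faster
-- what changed: Replaces the per-window heapify/heappop scan with a single-pass monotonic-deque sliding-window maximum (indices with strictly decreasing values), collecting the distinct maxima and sorting them once.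
import Mathlib
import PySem

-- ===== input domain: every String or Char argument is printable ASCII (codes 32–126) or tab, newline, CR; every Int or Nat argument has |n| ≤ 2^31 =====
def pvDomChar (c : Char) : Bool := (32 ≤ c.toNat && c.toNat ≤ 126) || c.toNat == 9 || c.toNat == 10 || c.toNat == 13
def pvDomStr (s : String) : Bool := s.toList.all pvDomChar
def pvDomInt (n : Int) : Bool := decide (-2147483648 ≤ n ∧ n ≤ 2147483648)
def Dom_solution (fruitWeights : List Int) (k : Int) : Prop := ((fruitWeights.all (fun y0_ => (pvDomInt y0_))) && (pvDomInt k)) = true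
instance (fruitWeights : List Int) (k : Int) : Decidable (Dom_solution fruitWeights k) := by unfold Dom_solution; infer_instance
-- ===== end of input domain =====

-- B replaces A's per-window heapify/heappop scan by a one-pass monotonic-deque
-- sliding-window maximum (objective: faster).

set_option maxRecDepth 8192

-- ===== PORT A =====
def minus (n : Int) : Int := n * (-1)

-- heapq.heapify + heappop return the minimum of tmpList (IndexError on an empty
-- window, excluded by Pre_): ported by the library call's contract PySem.List.min?.
def solution (fruitWeights : List Int) (k : Int) : List Int :=
  let answer : PySem.Set Int :=
    (PySem.List.pyRange 0 ((fruitWeights.length : Int) - k + 1) 1).foldl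
      (fun answer i =>
        let tmpList := (PySem.List.slice fruitWeights (some i) (some (i + k))).map minus
        let tmp := (PySem.List.min? tmpList (fun x => x)).getD 0
        PySem.Set.add answer (tmp * (-1)))
      PySem.Set.empty
  PySem.List.sorted answer (fun x => x) true

-- ===== PORT B =====
-- the 'while len(dq) > head and fruitWeights[dq[-1]] <= fruitWeights[j]: dq.pop()' loop
def popWhile (a : List Int) (x : Int) (head : Nat) (dq : List Nat) : List Nat :=
  if h : head < dq.length then
    if a.getD (dq.getLastD 0) 0 ≤ x then popWhile a x head dq.dropLast else dq
  else dq
termination_by dq.length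
decreasing_by simp [List.length_dropLast]; omega

-- one iteration of B's 'for j in range(len(fruitWeights))' loop; state = (dq, head, maxima)
def stepB (a : List Int) (k : Int) (st : List Nat × Nat × PySem.Set Int) (j : Nat) :
    List Nat × Nat × PySem.Set Int :=
  let dq := popWhile a (a.getD j 0) st.2.1 st.1
  let dq := dq ++ [j]
  let head := if (dq.getD st.2.1 0 : Int) ≤ (j : Int) - k then st.2.1 + 1 else st.2.1
  let mx := if (j : Int) ≥ k - 1 then PySem.Set.add st.2.2 (a.getD (dq.getD head 0) 0) else st.2.2
  (dq, head, mx)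

def solution_alt (fruitWeights : List Int) (k : Int) : List Int :=
  let st := (List.range fruitWeights.length).foldl (stepB fruitWeights k)
              ([], 0, (PySem.Set.empty : PySem.Set Int))
  PySem.List.sorted st.2.2 (fun x => x) true

-- ===== PRECONDITION & SPEC =====
-- A raises IndexError (heappop of an empty window slice) exactly when k ≤ 0.
def Pre_solution (fruitWeights : List Int) (k : Int) : Prop := 1 ≤ k
instance (fruitWeights : List Int) (k : Int) : Decidable (Pre_solution fruitWeights k) := by
  unfold Pre_solution; infer_instance

def pvWitness_solution : List Int × Int := ([3, 1, 4, 1, 5], 2)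

def Spec_solution (fruitWeights : List Int) (k : Int) (out : List Int) : Prop := out = solution_alt fruitWeights k
instance (fruitWeights : List Int) (k : Int) (out : List Int) : Decidable (Spec_solution fruitWeights k out) := by unfold Spec_solution; infer_instance

-- ===== CLAIM (what is proved, stated in full; the proofs are below) =====
def Claim_equal_solution : Prop := ∀ (fruitWeights : List Int) (k : Int), Dom_solution fruitWeights k → Pre_solution fruitWeights k → Spec_solution fruitWeights k (solution fruitWeights k)

-- ===== LEMMAS AND PROOFS =====
def av (a : List Int) (i : Nat) : Int := a.getD i 0
def goodB (a : List Int) (k : Int) (j i : Nat) : Bool :=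
  decide ((j : Int) < (i : Int) + k) && decide (∀ t, t < j + 1 → i < t → av a t < av a i)
def GF (a : List Int) (k : Int) (m : Nat) : List Nat :=
  (List.range m).filter (goodB a k (m - 1))

lemma GF_sorted (a : List Int) (k : Int) (m : Nat) : (GF a k m).Pairwise (· < ·) :=
  (List.pairwise_lt_range).sublist List.filter_sublist

lemma mem_GF (a : List Int) (k : Int) (m i : Nat) (h : i ∈ GF a k m) :
    i < m ∧ ((m : Int) - 1 < (i : Int) + k) ∧ (∀ t, t < m → i < t → av a t < av a i) := by
  simp only [GF] at h
  rw [List.mem_filter, List.mem_range] at h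
  obtain ⟨him, hg⟩ := h
  simp only [goodB, Bool.and_eq_true, decide_eq_true_eq] at hg
  refine ⟨him, by push_cast; omega, fun t ht hit => hg.2 t (by omega) hit⟩

lemma GF_pairwise (a : List Int) (k : Int) (m : Nat) :
    (GF a k m).Pairwise (fun p q => av a q < av a p) := by
  have h := GF_sorted a k m
  refine List.Pairwise.imp_of_mem ?_ h
  intro p q hp hq hpq
  obtain ⟨hqm, _, _⟩ := mem_GF a k m q hq
  obtain ⟨_, _, hdom⟩ := mem_GF a k m p hp
  exact hdom q hqm hpq

lemma GF_step (a : List Int) (k : Int) (hk : 1 ≤ k) (m : Nat) :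
    GF a k (m + 1) =
      (let L := (GF a k m).filter (fun i => decide (av a m < av a i)) ++ [m];
       if ((L.headD 0 : Nat) : Int) ≤ (m : Int) - k then L.tail else L) := by
  have hgood_m : goodB a k m m = true := by
    simp only [goodB, Bool.and_eq_true, decide_eq_true_eq]
    exact ⟨by omega, fun t ht hmt => absurd ht (by omega)⟩
  have hA : (List.range m).filter (goodB a k m)
      = ((GF a k m).filter (fun i => decide (av a m < av a i))).filter
          (fun (i : Nat) => decide ((m : Int) < (i : Int) + k)) := by
    simp only [GF]
    rw [List.filter_filter, List.filter_filter]
    apply List.filter_congr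
    intro i hi
    rw [List.mem_range] at hi
    unfold goodB
    rw [Bool.eq_iff_iff]
    simp only [Bool.and_eq_true, decide_eq_true_eq]
    constructor
    · rintro ⟨hw, hd⟩
      exact ⟨⟨hw, hd m (by omega) hi⟩, by omega, fun t ht hit => hd t (by omega) hit⟩
    · rintro ⟨⟨hw, hvm⟩, hw', hd⟩
      refine ⟨hw, fun t ht hit => ?_⟩
      rcases Nat.lt_or_ge t m with h | h
      · exact hd t (by omega) hit
      · have : t = m := by omega
        subst this; exact hvm
  have hGsucc : GF a k (m + 1)
      = ((GF a k m).filter (fun i => decide (av a m < av a i))).filter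
          (fun (i : Nat) => decide ((m : Int) < (i : Int) + k)) ++ [m] := by
    show (List.range (m + 1)).filter (goodB a k m) = _
    rw [List.range_succ, List.filter_append, hA]
    simp only [List.filter_cons, List.filter_nil, hgood_m, if_true]
  set Lf := (GF a k m).filter (fun i => decide (av a m < av a i)) with hLf
  cases hLfe : Lf with
  | nil =>
    simp only [List.nil_append]
    have : ¬ ((m : Int) ≤ (m : Int) - k) := by omega
    simp only [List.headD_cons, this, if_false]
    rw [hGsucc, hLfe]
    simp
  | cons f rest =>
    have hfmem : f ∈ GF a k m := by
      have : f ∈ Lf := by rw [hLfe]; simp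
      exact List.mem_of_mem_filter (hLf ▸ this)
    obtain ⟨hfm, hfw, _⟩ := mem_GF a k m f hfmem
    have hLf_sorted : Lf.Pairwise (· < ·) := (GF_sorted a k m).sublist List.filter_sublist
    have hrest : ∀ i ∈ rest, f < i := by
      rw [hLfe] at hLf_sorted
      exact (List.pairwise_cons.mp hLf_sorted).1
    have hrest_w : ∀ i ∈ rest, decide ((m : Int) < (i : Int) + k) = true := by
      intro i hi
      have := hrest i hi
      simp only [decide_eq_true_eq]
      omega
    simp only [List.cons_append, List.headD_cons]
    by_cases hc : ((f : Nat) : Int) ≤ (m : Int) - k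
    · simp only [hc, if_true, List.tail_cons]
      rw [hGsucc, hLfe]
      have hf_fail : decide ((m : Int) < (f : Int) + k) = false := by
        simp only [decide_eq_false_iff_not]; omega
      rw [List.filter_cons, hf_fail]
      simp only [Bool.false_eq_true, if_false]
      rw [List.filter_eq_self.mpr hrest_w]
    · simp only [hc, if_false]
      rw [hGsucc, hLfe]
      have hf_ok : decide ((m : Int) < (f : Int) + k) = true := by
        simp only [decide_eq_true_eq]; omega
      rw [List.filter_cons, hf_ok]
      simp only [if_true]
      rw [List.filter_eq_self.mpr hrest_w]
      simp

lemma goodB_self (a : List Int) (k : Int) (hk : 1 ≤ k) (m : Nat) : goodB a k m m = true := by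
  simp only [goodB, Bool.and_eq_true, decide_eq_true_eq]
  exact ⟨by omega, fun t ht hmt => absurd ht (by omega)⟩

lemma GF_succ_ne (a : List Int) (k : Int) (hk : 1 ≤ k) (m : Nat) : GF a k (m + 1) ≠ [] := by
  have : m ∈ GF a k (m + 1) :=
    List.mem_filter.mpr ⟨List.mem_range.mpr (by omega), goodB_self a k hk m⟩
  intro h; rw [h] at this; exact absurd this (List.not_mem_nil)

lemma GF_head_max (a : List Int) (k : Int) (hk : 1 ≤ k) (m : Nat) :
    ((GF a k (m + 1)).headD 0 ≤ m ∧ (m : Int) < (((GF a k (m + 1)).headD 0 : Nat) : Int) + k) ∧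
      ∀ t : Nat, t ≤ m → (m : Int) < (t : Int) + k →
        av a t ≤ av a ((GF a k (m + 1)).headD 0) := by
  obtain ⟨h0, tl, hcases⟩ : ∃ h0 tl, GF a k (m + 1) = h0 :: tl := by
    rcases he : GF a k (m + 1) with _ | ⟨h0, tl⟩
    · exact absurd he (GF_succ_ne a k hk m)
    · exact ⟨h0, tl, rfl⟩
  have hmem : h0 ∈ GF a k (m + 1) := by rw [hcases]; simp
  obtain ⟨hlt, hw, hdom⟩ := mem_GF a k (m + 1) h0 hmem
  have hw' : (m : Int) < (h0 : Int) + k := by push_cast at hw; omega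
  have hmin : ∀ i ∈ GF a k (m + 1), h0 ≤ i := by
    intro i hi
    rcases List.mem_cons.mp (hcases ▸ hi) with h | h
    · omega
    · have := (List.pairwise_cons.mp (hcases ▸ GF_sorted a k (m + 1))).1 i h
      omega
  have key : ∀ d t, m - t = d → t ≤ m → (m : Int) < (t : Int) + k → av a t ≤ av a h0 := by
    intro d
    induction d using Nat.strong_induction_on with
    | _ d ih =>
      intro t hd htm htw
      rcases Nat.lt_or_ge t h0 with hlt' | hge
      · have hnot : t ∉ GF a k (m + 1) := fun hmem' => absurd (hmin t hmem') (by omega)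
        have hng : ¬ (goodB a k m t = true) := by
          intro hb
          exact hnot (List.mem_filter.mpr ⟨List.mem_range.mpr (by omega), hb⟩)
        simp only [goodB, Bool.and_eq_true, decide_eq_true_eq, not_and] at hng
        have := hng htw
        push_neg at this
        obtain ⟨s, hs1, hs2, hs3⟩ := this
        have hih := ih (m - s) (by omega) s rfl (by omega) (by omega)
        omega
      · rcases Nat.eq_or_lt_of_le hge with h | h
        · rw [h]
        · exact le_of_lt (hdom t (by omega) h)
  rw [hcases]
  simp only [List.headD_cons]
  exact ⟨⟨by omega, hw'⟩, fun t htm htw => key (m - t) t rfl htm htw⟩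

lemma popWhile_spec (a : List Int) (x : Int) :
    ∀ (G : List Nat) (dq : List Nat) (head : Nat),
      dq.drop head = G → G.Pairwise (fun p q => av a q < av a p) →
      popWhile a x head dq = dq.take head ++ G.filter (fun i => decide (x < av a i)) := by
  intro G
  induction G using List.reverseRecOn with
  | nil =>
    intro dq head hd _
    have hlen : dq.length ≤ head := by
      by_contra h
      have := List.length_drop (l := dq) (i := head)
      rw [hd] at this; simp at this; omega
    rw [popWhile]
    simp [Nat.not_lt.mpr hlen, List.take_of_length_le hlen]
  | append_singleton G' i0 ih =>
    intro dq head hd hpw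
    have hne : dq.drop head ≠ [] := by rw [hd]; simp
    have hlt : head < dq.length := by
      by_contra h
      exact hne (List.drop_eq_nil_of_le (Nat.not_lt.mp h))
    have hlast : dq.getLastD 0 = i0 := by
      have h1 : dq.getLastD 0 = (dq.drop head).getLastD 0 := by
        rw [List.getLastD_eq_getLast?, List.getLastD_eq_getLast?, List.getLast?_drop]
        simp [Nat.not_le.mpr hlt]
      rw [h1, hd]; simp
    rw [popWhile]
    rw [dif_pos hlt, hlast]
    by_cases hle : a.getD i0 0 ≤ x
    · rw [if_pos hle]
      have hdl : dq.dropLast.drop head = G' := by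
        have hcomm : dq.dropLast.drop head = (dq.drop head).dropLast := by
          rw [List.dropLast_eq_take, List.dropLast_eq_take, List.drop_take, List.length_drop]
          congr 1; omega
        rw [hcomm, hd]; simp
      have := ih dq.dropLast head hdl (hpw.sublist (by simp))
      rw [this]
      have htake : dq.dropLast.take head = dq.take head := by
        rw [List.dropLast_eq_take, List.take_take]
        congr 1; omega
      rw [htake]
      have : (G' ++ [i0]).filter (fun i => decide (x < av a i)) = G'.filter (fun i => decide (x < av a i)) := by
        simp only [List.filter_append, List.filter_cons, List.filter_nil]
        have : ¬ x < av a i0 := by show ¬ x < a.getD i0 0; omega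
        simp [this]
      rw [this]
    · rw [if_neg hle]
      have hall : ∀ p ∈ G' ++ [i0], x < av a p := by
        intro p hp
        rcases List.mem_append.mp hp with h | h
        · have : av a i0 < av a p := by
            have := List.pairwise_append.mp hpw
            exact this.2.2 p h i0 (by simp)
          have hx : x < av a i0 := by show x < a.getD i0 0; omega
          omega
        · simp at h; subst h; show x < a.getD p 0; omega
      rw [List.filter_eq_self.mpr (by intro p hp; simpa using hall p hp)]
      rw [← hd, List.take_append_drop]

def bval (a : List Int) (k : Int) (j : Nat) : Int := av a ((GF a k (j + 1)).headD 0)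

lemma getD_eq_drop_headD (l : List Nat) (n : Nat) (d : Nat) : l.getD n d = (l.drop n).headD d := by
  rw [List.getD_eq_getElem?_getD, List.headD_eq_head?_getD, List.head?_drop]

lemma fold_inv (a : List Int) (k : Int) (hk : 1 ≤ k) (m : Nat) :
    let st := (List.range m).foldl (stepB a k) ([], 0, (PySem.Set.empty : PySem.Set Int))
    st.1.drop st.2.1 = GF a k m ∧ st.2.1 ≤ st.1.length ∧
      st.2.2 = (List.range m).foldl
        (fun s (j : Nat) => if (j : Int) ≥ k - 1 then PySem.Set.add s (bval a k j) else s) [] := by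
  induction m with
  | zero => simp [GF]
  | succ m ih =>
    simp only at ih ⊢
    obtain ⟨ih1, ih2, ih3⟩ := ih
    rw [List.range_succ, List.foldl_append, List.foldl_cons, List.foldl_nil]
    set st := (List.range m).foldl (stepB a k) ([], 0, (PySem.Set.empty : PySem.Set Int)) with hst
    obtain ⟨dq, head, mx⟩ := st
    simp only at ih1 ih2 ih3 ⊢
    -- unfold one step
    show _ ∧ _ ∧ _
    rw [stepB]
    simp only
    -- the popWhile result
    have hpop : popWhile a (a.getD m 0) head dq
        = dq.take head ++ (GF a k m).filter (fun i => decide (av a m < av a i)) := by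
      have := popWhile_spec a (a.getD m 0) (GF a k m) dq head ih1 (GF_pairwise a k m)
      exact this
    rw [hpop]
    set Lf := (GF a k m).filter (fun i => decide (av a m < av a i)) with hLfdef
    have htklen : (dq.take head).length = head := by
      rw [List.length_take]; omega
    have hdrop2 : (dq.take head ++ Lf ++ [m]).drop head = Lf ++ [m] := by
      rw [List.append_assoc, List.drop_append_of_le_length (by omega), List.drop_of_length_le (by omega)]
      simp [htklen]
    have hgetD : (dq.take head ++ Lf ++ [m]).getD head 0 = (Lf ++ [m]).headD 0 := by
      rw [getD_eq_drop_headD, hdrop2]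
    have hstep := GF_step a k hk m
    simp only [← hLfdef] at hstep
    have hstep' : GF a k (m + 1)
        = if (((Lf ++ [m]).headD 0 : Nat) : Int) ≤ (m : Int) - k
          then (Lf ++ [m]).tail else (Lf ++ [m]) := hstep
    by_cases hc : (((Lf ++ [m]).headD 0 : Nat) : Int) ≤ (m : Int) - k
    · -- front drop
      rw [hgetD, if_pos hc]
      have hdrop3 : (dq.take head ++ Lf ++ [m]).drop (head + 1) = (Lf ++ [m]).tail := by
        rw [← List.drop_one, ← hdrop2, List.drop_drop]
      have hGF : GF a k (m + 1) = (Lf ++ [m]).tail := by rw [hstep', if_pos hc]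
      refine ⟨by rw [hdrop3, hGF], ?_, ?_⟩
      · simp only [List.length_append, List.length_take, List.length_cons, List.length_nil]
        omega
      · rw [ih3, List.foldl_append, List.foldl_cons, List.foldl_nil]
        by_cases hm' : (m : Int) ≥ k - 1
        · rw [if_pos hm', if_pos hm']
          congr 1
          rw [getD_eq_drop_headD, hdrop3]
          rw [bval, hGF]
          rfl
        · rw [if_neg hm', if_neg hm']
    · rw [hgetD, if_neg hc]
      have hGF : GF a k (m + 1) = Lf ++ [m] := by rw [hstep', if_neg hc]
      refine ⟨by rw [hdrop2, hGF], ?_, ?_⟩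
      · simp only [List.length_append, List.length_take, List.length_cons, List.length_nil]
        omega
      · rw [ih3, List.foldl_append, List.foldl_cons, List.foldl_nil]
        by_cases hm' : (m : Int) ≥ k - 1
        · rw [if_pos hm', if_pos hm']
          congr 1
          rw [getD_eq_drop_headD, hdrop2]
          rw [bval, hGF]
          rfl
        · rw [if_neg hm', if_neg hm']

lemma Aval_spec (l : List Int) (hl : l ≠ []) :
    ((PySem.List.min? (l.map minus) (fun x => x)).getD 0 * (-1)) ∈ l ∧
      ∀ y ∈ l, y ≤ (PySem.List.min? (l.map minus) (fun x => x)).getD 0 * (-1) := by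
  obtain ⟨v, hv⟩ : ∃ v, PySem.List.min? (l.map minus) (fun x => x) = some v := by
    rcases hmin : PySem.List.min? (l.map minus) (fun x => x) with _ | v
    · rw [PySem.List.min?_eq_none_iff] at hmin
      simp at hmin; exact absurd hmin hl
    · exact ⟨v, rfl⟩
  rw [hv]
  simp only [Option.getD_some]
  obtain ⟨z, hz, hzv⟩ := List.mem_map.mp (PySem.List.min?_mem hv)
  have hmin := PySem.List.min?_isMin hv
  constructor
  · have : v * (-1) = z := by rw [← hzv]; simp [minus]
    rw [this]; exact hz
  · intro y hy
    have := hmin (minus y) (List.mem_map_of_mem hy)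
    simp only [minus] at this
    omega

lemma slice_eq_map_av (a : List Int) (i0 K : Nat) (h : i0 + K ≤ a.length) :
    (a.drop i0).take K = (List.range' i0 K).map (av a) := by
  apply List.ext_getElem
  · simp; omega
  · intro n h1 h2
    simp only [List.length_take, List.length_drop] at h1
    simp only [List.getElem_take, List.getElem_drop, List.getElem_map, List.getElem_range', one_mul]
    rw [av, List.getD_eq_getElem?_getD, List.getElem?_eq_getElem (by omega)]
    simp

lemma Aval_eq_bval (a : List Int) (k : Int) (hk : 1 ≤ k) (i : Nat)
    (hi : (i : Int) + k ≤ (a.length : Int)) :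
    (PySem.List.min? ((PySem.List.slice a (some (i : Int)) (some ((i : Int) + k))).map minus)
        (fun x => x)).getD 0 * (-1)
      = bval a k (i + k.toNat - 1) := by
  set K := k.toNat with hK
  have hkK : (K : Int) = k := Int.toNat_of_nonneg (by omega)
  have hslice : PySem.List.slice a (some (i : Int)) (some ((i : Int) + k)) = (a.drop i).take K := by
    rw [← hkK, PySem.List.slice_natCast_add]
  have hlenK : i + K ≤ a.length := by omega
  rw [hslice, slice_eq_map_av a i K hlenK]
  have hKpos : 1 ≤ K := by omega
  have hne : (List.range' i K).map (av a) ≠ [] := by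
    simp [List.range'_eq_nil_iff]; omega
  obtain ⟨hmem, hmax⟩ := Aval_spec _ hne
  set m := i + K - 1 with hm
  have hm1 : m + 1 = i + K := by omega
  simp only [bval]
  obtain ⟨⟨hh1, hh2⟩, hdom⟩ := GF_head_max a k hk m
  set h0 := (GF a k (m + 1)).headD 0 with hh0
  set Av := (PySem.List.min? (((List.range' i K).map (av a)).map minus) (fun x => x)).getD 0 * (-1) with hAv
  obtain ⟨t, ht, htv⟩ := List.mem_map.mp hmem
  rw [List.mem_range'_1] at ht
  have h1 : Av ≤ av a h0 := by
    rw [← htv]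
    exact hdom t (by omega) (by omega)
  have h2 : av a h0 ≤ Av := by
    apply hmax
    exact List.mem_map_of_mem (List.mem_range'_1.mpr (by omega))
  omega

lemma fold_align (k : Int) (hk : 1 ≤ k) (f : Nat → Int) :
    ∀ (N : Nat) (s0 : PySem.Set Int),
      (List.range N).foldl (fun s (j : Nat) => if (j : Int) ≥ k - 1 then PySem.Set.add s (f j) else s) s0
        = (List.range (N + 1 - k.toNat)).foldl (fun s (i : Nat) => PySem.Set.add s (f (i + k.toNat - 1))) s0 := by
  intro N
  induction N with
  | zero =>
    intro s0
    have : 1 - k.toNat = 0 := by omega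
    simp [this]
  | succ N ih =>
    intro s0
    rw [List.range_succ, List.foldl_append, List.foldl_cons, List.foldl_nil, ih]
    by_cases hN : (N : Int) ≥ k - 1
    · have hc : N + 1 + 1 - k.toNat = (N + 1 - k.toNat) + 1 := by omega
      rw [if_pos hN, hc, List.range_succ, List.foldl_append, List.foldl_cons, List.foldl_nil]
      congr 2
      omega
    · have hc : N + 1 + 1 - k.toNat = N + 1 - k.toNat := by omega
      rw [if_neg hN, hc]

theorem main_eq (a : List Int) (k : Int) (hk : 1 ≤ k) : solution a k = solution_alt a k := by
  unfold solution solution_alt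
  simp only []
  congr 1
  obtain ⟨-, -, hinv⟩ := fold_inv a k hk a.length
  rw [hinv]
  rw [PySem.List.pyRange_one]
  rw [List.foldl_map]
  have hC : (((a.length : Int)) - k + 1 - 0).toNat = a.length + 1 - k.toNat := by omega
  rw [hC]
  rw [fold_align k hk (bval a k) a.length []]
  have he : (PySem.Set.empty : PySem.Set Int) = [] := rfl
  rw [he]
  apply PySem.List.foldl_congr_mem'
  intro t ht acc
  rw [List.mem_range] at ht
  simp only [zero_add]
  congr 1
  exact Aval_eq_bval a k hk t (by omega)

-- ===== VERDICT (by name: the statement is the Claim_ definition above) =====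
theorem solution_spec : Claim_equal_solution := by
  intro fruitWeights k _ hk
  unfold Spec_solution
  exact main_eq fruitWeights k hk
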